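-- pv_equiv track=rewrite | github.com/A-M-05/spider-search | src/crawler/text_utils.py | tokenize_with_stopwords
-- ===== SOURCE A (Python) =====
-- def tokenize_with_stopwords(text_content: str) -> list[str]:
--     """
--     Returns tokens INCLUDING stopwords (excluding pure digits).
--     Used to compute stopword frequencies.
--     """
--     # Buffer for the token currently being built
--     current = []
--     # Collected tokens (includes stopwords)
--     tokens = []
--
--     # Normalize to lowercase so counts are case-insensitive
--     text_lower = text_content.lower()
--
--     # Scan the text character-by-character
--     for char in text_lower:
--         # Keep ASCII alphanumeric chars in the current token
--         if char.isalnum() and char.isascii():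
--             current.append(char)
--         else:
--             # On delimiter, flush buffered token if it exists
--             if current:
--                 token = ''.join(current)
--                 # Keep token only if non-empty and not pure digits
--                 if token and not token.isdigit():
--                     tokens.append(token)
--                 # Reset buffer for next token
--                 current = []
--
--     # Flush final buffered token if text ended mid-token
--     if current:
--         token = ''.join(current)
--         # Apply same filtering rules as above
--         if token and not token.isdigit():
--             tokens.append(token)
--
--     # Return list of tokens including stopwords
--     return tokens
-- ===== SOURCE B (Python) =====
-- def tokenize_with_stopwords(text_content: str) -> list[str]:
--     """
--     Returns tokens INCLUDING stopwords (excluding pure digits).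
--     Replace every non-(ASCII alphanumeric) character of the lowercased text
--     by a space, then split on whitespace and drop pure-digit tokens.
--     """
--     cleaned = ''.join(
--         c if (c.isalnum() and c.isascii()) else ' '
--         for c in text_content.lower()
--     )
--     return [t for t in cleaned.split() if not t.isdigit()]
-- ===== Notes on version B (the rewrite author's own statement) =====
-- stated objective: idiomatic
-- what changed: Replaces the manual character-by-character scanner with buffer/flush state by a translate-then-split pipeline: map every non-token character to a space once, then str.split() extracts the tokens and a comprehension filters out pure-digit ones.
import Mathlib
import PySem

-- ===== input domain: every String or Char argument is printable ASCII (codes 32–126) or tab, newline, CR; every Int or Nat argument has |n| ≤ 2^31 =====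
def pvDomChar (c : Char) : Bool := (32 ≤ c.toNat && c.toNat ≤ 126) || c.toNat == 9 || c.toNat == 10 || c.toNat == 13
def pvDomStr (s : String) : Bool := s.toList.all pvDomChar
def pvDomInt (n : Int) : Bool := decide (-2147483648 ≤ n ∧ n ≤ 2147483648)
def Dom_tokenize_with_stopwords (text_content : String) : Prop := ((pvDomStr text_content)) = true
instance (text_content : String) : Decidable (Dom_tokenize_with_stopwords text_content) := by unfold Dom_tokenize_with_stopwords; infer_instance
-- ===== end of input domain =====

-- B replaces A's manual char-by-char scanner (buffer + flush state) by a translate-then-split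
-- pipeline (map every non-token char to a space, split on whitespace, filter pure digits).

-- ===== PORT A =====
-- the flush step A performs on a delimiter and at end-of-text ("if current: token = ''.join(current); if token and not token.isdigit(): tokens.append(token); current = []")
def pvFlushA (tokens : List String) (current : List Char) : List String :=
  if !current.isEmpty then
    let token := String.ofList current
    if token != "" && !PySem.Str.strIsdigit token then tokens ++ [token] else tokens
  else tokens

def tokenize_with_stopwords (text_content : String) : List String :=
  let text_lower := PySem.Str.lower text_content
  let st := text_lower.toList.foldl
    (fun (st : List Char × List String) char =>
      if PySem.Chars.isalnum char && decide (char.toNat < 128) then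
        (st.1 ++ [char], st.2)
      else
        if !st.1.isEmpty then ([], pvFlushA st.2 st.1) else (st.1, st.2))
    ([], [])
  pvFlushA st.2 st.1

-- ===== PORT B =====
def tokenize_with_stopwords_alt (text_content : String) : List String :=
  let cleaned := String.ofList ((PySem.Str.lower text_content).toList.map
    (fun c => if PySem.Chars.isalnum c && decide (c.toNat < 128) then c else ' '))
  (PySem.Str.split₀ cleaned).filter (fun t => !PySem.Str.strIsdigit t)

-- ===== PRECONDITION & SPEC =====
def Spec_tokenize_with_stopwords (text_content : String) (out : List String) : Prop := out = tokenize_with_stopwords_alt text_content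
instance (text_content : String) (out : List String) : Decidable (Spec_tokenize_with_stopwords text_content out) := by unfold Spec_tokenize_with_stopwords; infer_instance

-- ===== CLAIM (what is proved, stated in full; the proofs are below) =====
def Claim_equal_tokenize_with_stopwords : Prop := ∀ (text_content : String), Dom_tokenize_with_stopwords text_content → Spec_tokenize_with_stopwords text_content (tokenize_with_stopwords text_content)

-- ===== LEMMAS AND PROOFS =====

def pvKeep (c : Char) : Bool := PySem.Chars.isalnum c && decide (c.toNat < 128)

def pvMapc (c : Char) : Char := if pvKeep c then c else ' '

lemma pvKeep_not_space {c : Char} (h : pvKeep c = true) : PySem.Chars.isspace c = false := by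
  simp only [pvKeep, PySem.Chars.isalnum, PySem.Chars.isalpha, PySem.Chars.isdigit,
    PySem.Chars.isupper, PySem.Chars.islower, Char.le_def, Bool.and_eq_true, Bool.or_eq_true,
    decide_eq_true_eq] at h
  have h' : (48 ≤ c.toNat ∧ c.toNat ≤ 57) ∨ (65 ≤ c.toNat ∧ c.toNat ≤ 90) ∨
      (97 ≤ c.toNat ∧ c.toNat ≤ 122) := by
    rcases h with ⟨h1 | h1, _⟩
    · rcases h1 with h1 | h1
      · exact Or.inr (Or.inl ⟨h1.1, h1.2⟩)
      · exact Or.inr (Or.inr ⟨h1.1, h1.2⟩)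
    · exact Or.inl ⟨h1.1, h1.2⟩
  simp only [PySem.Chars.isspace, Bool.or_eq_false_iff, Bool.and_eq_false_iff,
    decide_eq_false_iff_not]
  omega

lemma pvSpace_mapc {c : Char} (h : pvKeep c = false) : PySem.Chars.isspace (pvMapc c) = true := by
  simp [pvMapc, h, PySem.Chars.isspace]

-- hand-proved unfolding equations for PySem.Chars.split₀.go
lemma pvGo_nil (cur : List Char) (acc : List (List Char)) :
    PySem.Chars.split₀.go [] cur acc
    = if cur.isEmpty then acc.reverse else (cur.reverse :: acc).reverse := rfl

lemma pvGo_cons (c : Char) (rest cur : List Char) (acc : List (List Char)) :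
    PySem.Chars.split₀.go (c :: rest) cur acc
    = if PySem.Chars.isspace c then
        (if cur.isEmpty then PySem.Chars.split₀.go rest [] acc
         else PySem.Chars.split₀.go rest [] (cur.reverse :: acc))
      else PySem.Chars.split₀.go rest (c :: cur) acc := rfl

-- A's flush in closed form
lemma pvFlushA_eq (tokens : List String) (cur : List Char) :
    pvFlushA tokens cur
    = tokens ++ (if cur ≠ [] ∧ PySem.Chars.strIsdigit cur = false
                 then [String.ofList cur] else []) := by
  unfold pvFlushA
  by_cases hc : cur = []
  · simp [hc]
  · have hne : (String.ofList cur != "") = true := by simp [hc]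
    have hd : PySem.Str.strIsdigit (String.ofList cur) = PySem.Chars.strIsdigit cur := by
      rw [PySem.Str.strIsdigit_eq]; simp
    by_cases hdig : PySem.Chars.strIsdigit cur = true
    · simp [hc, hne, hdig]
    · simp only [Bool.not_eq_true] at hdig
      simp [hc, hne, hdig]

-- split₀.go with a nonempty accumulator prepends the accumulated tokens (reversed)
lemma pvGo_acc (l : List Char) : ∀ (cur : List Char) (acc : List (List Char)),
    PySem.Chars.split₀.go l cur acc = acc.reverse ++ PySem.Chars.split₀.go l cur [] := by
  induction l with
  | nil =>
      intro cur acc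
      by_cases h : cur.isEmpty <;> simp [pvGo_nil, h]
  | cons c rest ih =>
      intro cur acc
      by_cases hs : PySem.Chars.isspace c
      · by_cases h : cur.isEmpty
        · simp only [pvGo_cons, hs, h, if_true]
          exact ih [] acc
        · simp only [pvGo_cons, hs, h, if_true, Bool.false_eq_true, if_false]
          rw [ih [] (cur.reverse :: acc), ih [] [cur.reverse]]
          simp
      · simp only [pvGo_cons, hs, Bool.false_eq_true, if_false]
        exact ih (c :: cur) acc

-- the step function of A's loop, named for the induction
def pvStepA (st : List Char × List String) (char : Char) : List Char × List String :=
  if pvKeep char then (st.1 ++ [char], st.2)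
  else if !st.1.isEmpty then ([], pvFlushA st.2 st.1) else (st.1, st.2)

-- key invariant: A's fold-then-flush from state (cur, tokens) equals tokens ++ the
-- digit-filtered tokens split₀.go yields on the space-mapped rest, seeded with cur
lemma pvKey (l : List Char) : ∀ (cur : List Char) (tokens : List String),
    pvFlushA (l.foldl pvStepA (cur, tokens)).2 (l.foldl pvStepA (cur, tokens)).1
    = tokens ++ ((PySem.Chars.split₀.go (l.map pvMapc) cur.reverse []).filter
        (fun t => !PySem.Chars.strIsdigit t)).map String.ofList := by
  induction l with
  | nil =>
      intro cur tokens
      simp only [List.foldl_nil, List.map_nil, pvGo_nil, List.isEmpty_reverse,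
        List.reverse_reverse, pvFlushA_eq]
      by_cases hc : cur.isEmpty
      · have : cur = [] := by simpa [List.isEmpty_iff] using hc
        simp [this]
      · have hne : cur ≠ [] := by simpa [List.isEmpty_iff] using hc
        by_cases hd : PySem.Chars.strIsdigit cur = true
        · simp [hc, hne, hd]
        · simp only [Bool.not_eq_true] at hd
          simp [hc, hne, hd]
  | cons c rest ih =>
      intro cur tokens
      by_cases hk : pvKeep c
      · have hm : pvMapc c = c := by simp [pvMapc, hk]
        have hs : PySem.Chars.isspace c = false := pvKeep_not_space hk
        simp only [List.foldl_cons, List.map_cons, hm, pvGo_cons, hs, Bool.false_eq_true,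
          if_false, pvStepA, hk, if_true]
        have : (c :: cur.reverse) = (cur ++ [c]).reverse := by simp
        rw [this]
        exact ih (cur ++ [c]) tokens
      · have hk' : pvKeep c = false := by simpa using hk
        have hs : PySem.Chars.isspace (pvMapc c) = true := pvSpace_mapc hk'
        by_cases h : cur.isEmpty
        · have hc : cur = [] := by simpa [List.isEmpty_iff] using h
          simp only [List.foldl_cons, List.map_cons, pvGo_cons, hs, if_true, hc,
            List.reverse_nil, List.isEmpty_nil, pvStepA, hk', Bool.false_eq_true, if_false,
            Bool.not_true]
          exact ih [] tokens
        · have hne : cur ≠ [] := by simpa [List.isEmpty_iff] using h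
          simp only [List.foldl_cons, List.map_cons, pvGo_cons, hs, if_true,
            List.isEmpty_reverse, h, Bool.false_eq_true, if_false, List.reverse_reverse,
            pvStepA, hk', Bool.not_eq_eq_eq_not, Bool.not_false, if_true]
          rw [ih [] (pvFlushA tokens cur), pvGo_acc _ _ [cur], pvFlushA_eq]
          by_cases hd : PySem.Chars.strIsdigit cur = true
          · simp [hne, hd, List.filter_append]
          · simp only [Bool.not_eq_true] at hd
            simp [hne, hd, List.filter_append]

-- B's result at the Chars level
lemma pvAlt_eq (s : String) :
    tokenize_with_stopwords_alt s
    = ((PySem.Chars.split₀.go ((PySem.Str.lower s).toList.map pvMapc) [] []).filter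
        (fun t => !PySem.Chars.strIsdigit t)).map String.ofList := by
  unfold tokenize_with_stopwords_alt
  have hmap : (fun c => if PySem.Chars.isalnum c && decide (c.toNat < 128) then c else ' ')
      = pvMapc := by funext c; simp [pvMapc, pvKeep]
  rw [hmap]
  set L := (PySem.Str.lower s).toList.map pvMapc with hL
  show (PySem.Str.split₀ (String.ofList L)).filter (fun t => !PySem.Str.strIsdigit t)
      = ((PySem.Chars.split₀.go L [] []).filter (fun t => !PySem.Chars.strIsdigit t)).map String.ofList
  have hsplit : PySem.Str.split₀ (String.ofList L)
      = (PySem.Chars.split₀ L).map String.ofList := by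
    have h := PySem.Str.split₀_map_toList (String.ofList L)
    simp only [String.toList_ofList] at h
    rw [← h, List.map_map]
    simp [Function.comp_def, String.ofList_toList]
  rw [hsplit, List.filter_map]
  have hfun : ((fun t => !PySem.Str.strIsdigit t) ∘ String.ofList)
      = (fun t => !PySem.Chars.strIsdigit t) := by
    funext t
    simp [Function.comp, PySem.Str.strIsdigit_eq]
  rw [hfun]
  rfl

-- ===== VERDICT (by name: the statement is the Claim_ definition above) =====
theorem tokenize_with_stopwords_spec : Claim_equal_tokenize_with_stopwords := by
  intro s _
  show tokenize_with_stopwords s = tokenize_with_stopwords_alt s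
  rw [pvAlt_eq]
  exact pvKey (PySem.Str.lower s).toList [] []
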